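-- pv_equiv track=rewrite | github.com/1x0DF0/skiddy-python-scripts | enumpath.py | _parse_ldap_entries
-- ===== SOURCE A (Python) =====
-- def _parse_ldap_entries(ldap_output):
--     """Parse LDAP search output into structured entries"""
--     entries = []
--     current_entry = {}
--
--     for line in ldap_output.split('\n'):
--         line = line.strip()
--
--         if line.startswith('dn:'):
--             # Start of new entry
--             if current_entry:
--                 entries.append(current_entry)
--             current_entry = {}
--         elif ':' in line and not line.startswith('#'):
--             # Attribute line
--             attr, value = line.split(':', 1)
--             attr = attr.strip()
--             value = value.strip()
--
--             if attr not in current_entry: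
--                 current_entry[attr] = []
--             current_entry[attr].append(value)
--
--     # Add last entry
--     if current_entry:
--         entries.append(current_entry)
--
--     return entries
-- ===== SOURCE B (Python) =====
-- def _parse_ldap_entries(ldap_output):
--     """Parse LDAP search output into structured entries (two-pass: group lines into blocks, then parse each block)"""
--     lines = [line.strip() for line in ldap_output.split('\n')]
--
--     # Pass 1: group lines into blocks; a 'dn:' line starts a new block (and is discarded).
--     blocks = [[]]
--     for line in lines:
--         if line.startswith('dn:'):
--             blocks.append([])
--         else:
--             blocks[-1].append(line)
--
--     # Pass 2: parse each block into a dict; keep only non-empty dicts.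
--     entries = []
--     for block in blocks:
--         entry = {}
--         for line in block:
--             if ':' in line and not line.startswith('#'):
--                 attr, value = line.split(':', 1)
--                 entry.setdefault(attr.strip(), []).append(value.strip())
--         if entry:
--             entries.append(entry)
--     return entries
-- ===== Notes on version B (the rewrite author's own statement) =====
-- stated objective: alternative
-- what changed: Replaces A's single stateful loop (entries list plus a mutable current_entry dict flushed at dn-markers and at the end) with a two-pass decomposition: first group the stripped lines into blocks delimited by 'dn:' lines, then parse each block independently into a dict via setdefault and keep the non-empty ones.
import Mathlib
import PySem

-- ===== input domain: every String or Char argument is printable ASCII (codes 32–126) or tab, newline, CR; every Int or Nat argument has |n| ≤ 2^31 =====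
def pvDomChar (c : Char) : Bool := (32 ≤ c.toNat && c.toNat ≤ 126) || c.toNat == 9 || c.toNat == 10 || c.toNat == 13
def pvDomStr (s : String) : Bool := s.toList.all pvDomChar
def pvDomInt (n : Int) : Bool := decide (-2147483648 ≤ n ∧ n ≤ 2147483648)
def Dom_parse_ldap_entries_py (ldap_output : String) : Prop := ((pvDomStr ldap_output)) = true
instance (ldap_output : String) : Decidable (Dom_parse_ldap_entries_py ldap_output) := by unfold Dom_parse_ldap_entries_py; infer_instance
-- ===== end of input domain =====

-- B re-decomposes A's single stateful loop into two passes (group stripped lines into blocks at 'dn:' markers, then parse each block into a dict); same cost, return values proved equal on all inputs.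

-- ===== PORT A =====
-- one iteration of A's for-loop over the state (entries, current_entry)
def pvStepA (st : List (PySem.Dict String (List String)) × PySem.Dict String (List String))
    (rawline : String) : List (PySem.Dict String (List String)) × PySem.Dict String (List String) :=
  let line := PySem.Str.strip rawline
  if PySem.Str.startswith line "dn:" then
    (if st.2.items ≠ [] then st.1 ++ [st.2] else st.1, PySem.Dict.empty)
  else if PySem.Str.isIn ":" line && !(PySem.Str.startswith line "#") then
    let parts := (PySem.Str.splitMax? line ":" 1).getD []
    let attr := PySem.Str.strip (parts.getD 0 "")
    let value := PySem.Str.strip (parts.getD 1 "")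
    let cur := if st.2.contains attr then st.2 else st.2.insert attr []   -- if attr not in current_entry: current_entry[attr] = []
    (st.1, cur.insert attr (cur.getD attr [] ++ [value]))                 -- current_entry[attr].append(value)
  else st

def parse_ldap_entries_py (ldap_output : String) : List (List (String × List String)) :=
  let st := ((PySem.Str.split? ldap_output "\n").getD []).foldl pvStepA ([], PySem.Dict.empty)
  (if st.2.items ≠ [] then st.1 ++ [st.2] else st.1).map (fun e => e.items)

-- ===== PORT B =====
-- pass 1 step: a 'dn:' line opens a new block, any other line joins the last block
def pvBlockStep (bs : List (List String)) (line : String) : List (List String) :=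
  if PySem.Str.startswith line "dn:" then bs ++ [[]]
  else bs.dropLast ++ [(bs.getLast?.getD []) ++ [line]]

-- pass 2 inner step: entry.setdefault(attr.strip(), []).append(value.strip())  (= Dict.modify: d[k] = d.get(k, []) + [v])
def pvUpdB (entry : PySem.Dict String (List String)) (line : String) : PySem.Dict String (List String) :=
  if PySem.Str.isIn ":" line && !(PySem.Str.startswith line "#") then
    let parts := (PySem.Str.splitMax? line ":" 1).getD []
    entry.modify (PySem.Str.strip (parts.getD 0 "")) [] (· ++ [PySem.Str.strip (parts.getD 1 "")])
  else entry

def pvParseBlock (block : List String) : PySem.Dict String (List String) :=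
  block.foldl pvUpdB PySem.Dict.empty

-- pass 2 outer step: keep the parsed entry only if it is non-empty
def pvCollectStep (es : List (PySem.Dict String (List String))) (b : List String) :
    List (PySem.Dict String (List String)) :=
  if (pvParseBlock b).items ≠ [] then es ++ [pvParseBlock b] else es

def parse_ldap_entries_py_alt (ldap_output : String) : List (List (String × List String)) :=
  let lines := ((PySem.Str.split? ldap_output "\n").getD []).map PySem.Str.strip
  let blocks := lines.foldl pvBlockStep [[]]
  (blocks.foldl pvCollectStep []).map (fun e => e.items)

-- ===== PRECONDITION & SPEC =====
def Spec_parse_ldap_entries_py (ldap_output : String) (out : List (List (String × List String))) : Prop := out = parse_ldap_entries_py_alt ldap_output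
instance (ldap_output : String) (out : List (List (String × List String))) : Decidable (Spec_parse_ldap_entries_py ldap_output out) := by unfold Spec_parse_ldap_entries_py; infer_instance

-- ===== CLAIM (what is proved, stated in full; the proofs are below) =====
def Claim_equal_parse_ldap_entries_py : Prop := ∀ (ldap_output : String), Dom_parse_ldap_entries_py ldap_output → Spec_parse_ldap_entries_py ldap_output (parse_ldap_entries_py ldap_output)

-- ===== LEMMAS AND PROOFS =====

-- common recursive description of the entry list still to be produced, given the pending entry c and the remaining (stripped) lines
def pvG (c : PySem.Dict String (List String)) : List String → List (PySem.Dict String (List String))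
  | [] => if c.items ≠ [] then [c] else []
  | l :: ls =>
      if PySem.Str.startswith l "dn:" then
        (if c.items ≠ [] then [c] else []) ++ pvG PySem.Dict.empty ls
      else pvG (pvUpdB c l) ls

-- recursive description of B's block grouping
def pvBlocks (cur : List String) : List String → List (List String)
  | [] => [cur]
  | l :: ls => if PySem.Str.startswith l "dn:" then cur :: pvBlocks [] ls else pvBlocks (cur ++ [l]) ls

-- recursive description of B's collection loop
def pvCollect : List (List String) → List (PySem.Dict String (List String))
  | [] => []
  | b :: bs => (if (pvParseBlock b).items ≠ [] then [pvParseBlock b] else []) ++ pvCollect bs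

-- A's two-statement dict update equals B's setdefault-append (Dict.modify)
theorem pvUpdA_eq (c : PySem.Dict String (List String)) (attr v : String) :
    (if c.contains attr then c else c.insert attr []).insert attr
      (((if c.contains attr then c else c.insert attr []).getD attr []) ++ [v])
      = c.modify attr [] (· ++ [v]) := by
  cases hc : c.contains attr with
  | true => simp [PySem.Dict.modify]
  | false =>
    simp only [Bool.false_eq_true, if_false, PySem.Dict.modify]
    rw [PySem.Dict.getD_insert_self, PySem.Dict.insert_insert_self,
      PySem.Dict.getD_of_not_contains c [] hc]

theorem pvStepA_not_dn (es : List (PySem.Dict String (List String)))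
    (c : PySem.Dict String (List String)) (r : String)
    (h : PySem.Str.startswith (PySem.Str.strip r) "dn:" = false) :
    pvStepA (es, c) r = (es, pvUpdB c (PySem.Str.strip r)) := by
  unfold pvStepA pvUpdB
  have h' : ¬ (PySem.Str.startswith (PySem.Str.strip r) "dn:" = true) := by rw [h]; simp
  simp only [if_neg h']
  split
  · exact congrArg (Prod.mk es) (pvUpdA_eq c _ _)
  · rfl

set_option maxHeartbeats 2000000 in
theorem pvG_foldA (raws : List String) : ∀ (es : List (PySem.Dict String (List String)))
    (c : PySem.Dict String (List String)),
    (if (raws.foldl pvStepA (es, c)).2.items ≠ []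
      then (raws.foldl pvStepA (es, c)).1 ++ [(raws.foldl pvStepA (es, c)).2]
      else (raws.foldl pvStepA (es, c)).1)
      = es ++ pvG c (raws.map PySem.Str.strip) := by
  induction raws with
  | nil =>
    intro es c
    simp only [List.foldl_nil, List.map_nil, pvG]
    by_cases hc : c.items = [] <;> simp [hc]
  | cons r rs ih =>
    intro es c
    simp only [List.foldl_cons, List.map_cons, pvG]
    cases hdn : PySem.Str.startswith (PySem.Str.strip r) "dn:" with
    | true =>
      have hstep : pvStepA (es, c) r =
          (if c.items ≠ [] then es ++ [c] else es, PySem.Dict.empty) := by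
        unfold pvStepA; simp only [hdn, if_true]
      rw [hstep, ih, if_pos rfl]
      generalize pvG PySem.Dict.empty (List.map PySem.Str.strip rs) = g
      by_cases hc : c.items = [] <;> simp [hc]
    | false =>
      have hdn' : ¬ (PySem.Str.startswith (PySem.Str.strip r) "dn:" = true) := by rw [hdn]; simp
      rw [pvStepA_not_dn es c r hdn, ih, if_neg Bool.false_ne_true]

theorem pvBlocks_foldB (L : List String) : ∀ (pre : List (List String)) (cur : List String),
    L.foldl pvBlockStep (pre ++ [cur]) = pre ++ pvBlocks cur L := by
  induction L with
  | nil => intro pre cur; simp [pvBlocks]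
  | cons l ls ih =>
    intro pre cur
    simp only [List.foldl_cons, pvBlocks]
    cases hdn : PySem.Str.startswith l "dn:" with
    | true =>
      have hstep : pvBlockStep (pre ++ [cur]) l = (pre ++ [cur]) ++ [[]] := by
        unfold pvBlockStep; rw [if_pos hdn]
      rw [hstep, ih (pre ++ [cur]) [], if_pos rfl]
      simp
    | false =>
      have hdn' : ¬ (PySem.Str.startswith l "dn:" = true) := by rw [hdn]; simp
      have hstep : pvBlockStep (pre ++ [cur]) l = pre ++ [cur ++ [l]] := by
        unfold pvBlockStep
        rw [if_neg hdn', List.dropLast_concat, List.getLast?_concat]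
        simp
      rw [hstep, ih pre (cur ++ [l]), if_neg Bool.false_ne_true]

theorem pvCollect_foldB (bs : List (List String)) :
    ∀ (es : List (PySem.Dict String (List String))),
    bs.foldl pvCollectStep es = es ++ pvCollect bs := by
  induction bs with
  | nil => intro es; simp [pvCollect]
  | cons b rest ih =>
    intro es
    simp only [List.foldl_cons, pvCollect, pvCollectStep]
    rw [ih]
    by_cases hb : (pvParseBlock b).items = [] <;> simp [hb]

theorem pvParseBlock_concat (cur : List String) (l : String) :
    pvParseBlock (cur ++ [l]) = pvUpdB (pvParseBlock cur) l := by
  simp [pvParseBlock]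

theorem pvCollect_blocks (L : List String) : ∀ (cur : List String),
    pvCollect (pvBlocks cur L) = pvG (pvParseBlock cur) L := by
  induction L with
  | nil => intro cur; simp [pvBlocks, pvCollect, pvG]
  | cons l ls ih =>
    intro cur
    simp only [pvBlocks, pvG]
    cases hdn : PySem.Str.startswith l "dn:" with
    | true =>
      rw [if_pos rfl, if_pos rfl]
      show pvCollect (cur :: pvBlocks [] ls) = _
      simp only [pvCollect]
      rw [ih []]
      rfl
    | false =>
      have hdn' : ¬ (PySem.Str.startswith l "dn:" = true) := by rw [hdn]; simp
      rw [if_neg Bool.false_ne_true, if_neg Bool.false_ne_true, ih (cur ++ [l]),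
        pvParseBlock_concat]

-- ===== VERDICT (by name: the statement is the Claim_ definition above) =====
theorem parse_ldap_entries_py_spec : Claim_equal_parse_ldap_entries_py := by
  intro ldap_output _
  unfold Spec_parse_ldap_entries_py parse_ldap_entries_py parse_ldap_entries_py_alt
  have hA := pvG_foldA ((PySem.Str.split? ldap_output "\n").getD []) [] PySem.Dict.empty
  have hB := pvBlocks_foldB (((PySem.Str.split? ldap_output "\n").getD []).map PySem.Str.strip) [] []
  rw [List.nil_append] at hB
  simp only [hA, hB, pvCollect_foldB, List.nil_append, pvCollect_blocks, pvParseBlock,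
    List.foldl_nil]
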